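-- pv_equiv track=rewrite | github.com/aboutcode-org/scancode-toolkit | src/summarycode/summarizer_legacy.py | get_primary_language
-- ===== SOURCE A (Python) =====
-- def get_primary_language(summary):
--     programming_language_summary = summary.get('programming_language')
--
--     programming_language_entry_by_count = {entry.get('count'): entry for entry in programming_language_summary}
--     primary_language = {}
--     if programming_language_entry_by_count:
--         highest_count = max(programming_language_entry_by_count)
--         primary_language = programming_language_entry_by_count[highest_count]
--
--     return primary_language
-- ===== SOURCE B (Python) =====
-- def get_primary_language(summary):
--     primary_language = {}
--     highest_count = None
--     for entry in summary.get('programming_language') or ():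
--         count = entry.get('count')
--         if highest_count is None or count >= highest_count:
--             highest_count = count
--             primary_language = entry
--     return primary_language
-- ===== Notes on version B (the rewrite author's own statement) =====
-- stated objective: simpler
-- what changed: Replaces the count-keyed intermediate dict plus max() over its keys with a single linear pass that keeps the running best entry, using >= so the last entry at the top count wins like A's dict overwrite.
import Mathlib
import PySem

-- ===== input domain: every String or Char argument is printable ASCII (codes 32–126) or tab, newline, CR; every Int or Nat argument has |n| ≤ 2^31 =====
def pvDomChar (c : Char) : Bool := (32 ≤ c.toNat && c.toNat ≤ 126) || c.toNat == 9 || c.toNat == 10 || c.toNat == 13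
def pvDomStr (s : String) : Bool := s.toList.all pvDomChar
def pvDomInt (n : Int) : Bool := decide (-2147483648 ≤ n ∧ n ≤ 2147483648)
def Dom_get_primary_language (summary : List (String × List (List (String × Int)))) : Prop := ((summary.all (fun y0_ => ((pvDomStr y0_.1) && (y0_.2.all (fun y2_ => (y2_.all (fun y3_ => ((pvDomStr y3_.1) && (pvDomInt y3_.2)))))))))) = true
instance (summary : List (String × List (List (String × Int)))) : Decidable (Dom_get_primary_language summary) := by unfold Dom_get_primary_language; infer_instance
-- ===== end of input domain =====

-- B replaces A's count-keyed intermediate dict + max() with one linear pass keeping the running best entry (>= so the last top-count entry wins): simpler, same cost.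


-- ===== PORT A =====
-- Python max(keys): first element, then replace whenever a strictly larger one appears.
-- A comparison involving None raises TypeError in Python (excluded by Pre_); this port keeps m there (comment: exact on Pre_).
def pyMaxKeys (ks : List (Option Int)) : Option (Option Int) :=
  match ks with
  | [] => none
  | k :: rest => some (rest.foldl (fun m x =>
      match m, x with
      | some a, some b => if a < b then x else m
      | _, _ => m) k)

def get_primary_language (summary : List (String × List (List (String × Int)))) : List (String × Int) :=
  let programming_language_summary :=
    (PySem.Dict.get? (PySem.Dict.mk summary) "programming_language").getD []
  let programming_language_entry_by_count :
      PySem.Dict (Option Int) (List (String × Int)) :=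
    programming_language_summary.foldl
      (fun d entry => PySem.Dict.insert d (PySem.Dict.get? (PySem.Dict.mk entry) "count") entry)
      PySem.Dict.empty
  if programming_language_entry_by_count.items ≠ [] then
    match pyMaxKeys programming_language_entry_by_count.keys with
    | some highest_count =>
        (PySem.Dict.get? programming_language_entry_by_count highest_count).getD []
    | none => []
  else []

-- ===== PORT B =====
-- one pass; state = (primary_language, highest_count).  'some h, none' is Python's None >= int
-- TypeError (excluded by Pre_); the port keeps the state there.
def pvStepB (st : List (String × Int) × Option Int) (entry : List (String × Int)) :
    List (String × Int) × Option Int :=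
  let count := PySem.Dict.get? (PySem.Dict.mk entry) "count"
  match st.2, count with
  | none, _ => (entry, count)
  | some h, some c => if h ≤ c then (entry, count) else st
  | some _, none => st

def get_primary_language_alt (summary : List (String × List (List (String × Int)))) : List (String × Int) :=
  (((PySem.Dict.get? (PySem.Dict.mk summary) "programming_language").getD []).foldl
      pvStepB ([], none)).1

-- ===== PRECONDITION & SPEC =====
-- Pre_ admits exactly the inputs on which A returns: the 'programming_language' key must be
-- present (A iterates None otherwise: TypeError) and the entries must either all carry a
-- 'count' or all lack it (a mix puts None and an int together in max(), which raises TypeError).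
def Pre_get_primary_language (summary : List (String × List (List (String × Int)))) : Prop :=
  let o := PySem.Dict.get? (PySem.Dict.mk summary) "programming_language"
  o.isSome = true ∧
    ((o.getD []).all (fun e => (PySem.Dict.get? (PySem.Dict.mk e) "count").isSome) = true ∨
     (o.getD []).all (fun e => (PySem.Dict.get? (PySem.Dict.mk e) "count").isNone) = true)
instance (summary : List (String × List (List (String × Int)))) : Decidable (Pre_get_primary_language summary) := by unfold Pre_get_primary_language; infer_instance

def pvWitness_get_primary_language : (List (String × List (List (String × Int)))) :=
  [("programming_language", [[("count", 2)], [("count", 5)], [("count", 5)]])]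

def Spec_get_primary_language (summary : List (String × List (List (String × Int)))) (out : List (String × Int)) : Prop := out = get_primary_language_alt summary
instance (summary : List (String × List (List (String × Int)))) (out : List (String × Int)) : Decidable (Spec_get_primary_language summary out) := by unfold Spec_get_primary_language; infer_instance

-- ===== CLAIM (what is proved, stated in full; the proofs are below) =====
def Claim_equal_get_primary_language : Prop := ∀ (summary : List (String × List (List (String × Int)))), Dom_get_primary_language summary → Pre_get_primary_language summary → Spec_get_primary_language summary (get_primary_language summary)

-- ===== LEMMAS AND PROOFS =====

-- abbreviations used only by the proofs
def pvCnt (e : List (String × Int)) : Option Int := PySem.Dict.get? (PySem.Dict.mk e) "count"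

def pvStepA (d : PySem.Dict (Option Int) (List (String × Int))) (entry : List (String × Int)) :
    PySem.Dict (Option Int) (List (String × Int)) :=
  PySem.Dict.insert d (PySem.Dict.get? (PySem.Dict.mk entry) "count") entry

-- invariant tying A's dict to B's scan state in the all-counts-present case
def pvInv (d : PySem.Dict (Option Int) (List (String × Int)))
    (p : List (String × Int)) (h : Int) : Prop :=
  (∀ k ∈ d.keys, ∃ v : Int, k = some v ∧ v ≤ h) ∧
  (some h) ∈ d.keys ∧ d.get? (some h) = some p

theorem pvFoldMax (h : Int) :
    ∀ (rest : List (Option Int)) (m : Option Int),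
      (∃ a : Int, m = some a ∧ a ≤ h) →
      (∀ x ∈ rest, ∃ v : Int, x = some v ∧ v ≤ h) →
      (some (h : Int) = m ∨ some (h : Int) ∈ rest) →
      rest.foldl (fun m x =>
        match m, x with
        | some a, some b => if a < b then x else m
        | _, _ => m) m = some h := by
  intro rest
  induction rest with
  | nil =>
      intro m _ _ hmem
      rcases hmem with hm | hm
      · simpa using hm.symm
      · simp at hm
  | cons x rest ih =>
      intro m hm hb hmem
      rcases hm with ⟨a, rfl, hah⟩
      obtain ⟨v, rfl, hvh⟩ := hb x (by simp)
      simp only [List.foldl_cons]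
      by_cases hav : a < v
      · simp only [if_pos hav]
        apply ih _ ⟨v, rfl, hvh⟩ (fun y hy => hb y (by simp [hy]))
        rcases hmem with hm | hm
        · -- some h = some a, but a < v ≤ h contradiction unless…
          exfalso
          have : a = h := by simpa using hm.symm
          omega
        · rcases List.mem_cons.mp hm with hm | hm
          · left
            have hv : h = v := by simpa using hm
            rw [hv]
          · right; exact hm
      · simp only [if_neg hav]
        apply ih _ ⟨a, rfl, hah⟩ (fun y hy => hb y (by simp [hy]))
        rcases hmem with hm | hm
        · left; exact hm
        · rcases List.mem_cons.mp hm with hm | hm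
          · left
            have hhv : h = v := by simpa using hm
            have : a = h := by omega
            simp [this]
          · right; exact hm

theorem pvInv_step (d : PySem.Dict (Option Int) (List (String × Int)))
    (p e : List (String × Int)) (h c : Int) (hc : pvCnt e = some c)
    (hne : pvInv d p h) :
    pvInv (pvStepA d e) (if h ≤ c then e else p) (if h ≤ c then c else h) := by
  obtain ⟨hbd, hmem, hget⟩ := hne
  have hstep : pvStepA d e = d.insert (some c) e := by
    simp only [pvStepA, pvCnt] at hc ⊢; rw [hc]
  rw [hstep]
  by_cases hle : h ≤ c
  · simp only [if_pos hle]
    refine ⟨?_, ?_, ?_⟩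
    · intro k hk
      rcases (PySem.Dict.mem_keys_insert _ _ _ _).mp hk with rfl | hk
      · exact ⟨c, rfl, le_refl c⟩
      · obtain ⟨v, rfl, hv⟩ := hbd k hk; exact ⟨v, rfl, le_trans hv hle⟩
    · exact (PySem.Dict.mem_keys_insert _ _ _ _).mpr (Or.inl rfl)
    · exact PySem.Dict.get?_insert_self _ _ _
  · simp only [if_neg hle]
    have hne' : (some h : Option Int) ≠ some c := by
      intro hh; apply hle; simp at hh; omega
    refine ⟨?_, ?_, ?_⟩
    · intro k hk
      rcases (PySem.Dict.mem_keys_insert _ _ _ _).mp hk with rfl | hk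
      · exact ⟨c, rfl, by omega⟩
      · exact hbd k hk
    · exact (PySem.Dict.mem_keys_insert _ _ _ _).mpr (Or.inr hmem)
    · rw [PySem.Dict.get?_insert_of_ne _ _ hne']; exact hget

theorem pvStepB_some (p e : List (String × Int)) (h c : Int) (hc : pvCnt e = some c) :
    pvStepB (p, some h) e = (if h ≤ c then e else p, some (if h ≤ c then c else h)) := by
  simp [pvStepB, pvCnt] at hc ⊢
  rw [hc]
  by_cases hle : h ≤ c <;> simp [hle]

-- joint fold lemma, all-counts-present case
theorem pvFold_some :
    ∀ (es : List (List (String × Int)))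
      (d : PySem.Dict (Option Int) (List (String × Int)))
      (p : List (String × Int)) (h : Int),
      (∀ e ∈ es, ∃ c : Int, pvCnt e = some c) →
      pvInv d p h →
      ∃ (p' : List (String × Int)) (h' : Int),
        es.foldl pvStepB (p, some h) = (p', some h') ∧
        pvInv (es.foldl pvStepA d) p' h' := by
  intro es
  induction es with
  | nil => intro d p h _ hinv; exact ⟨p, h, rfl, hinv⟩
  | cons e es ih =>
      intro d p h hall hinv
      obtain ⟨c, hc⟩ := hall e (by simp)
      simp only [List.foldl_cons]
      rw [pvStepB_some p e h c hc]
      exact ih (pvStepA d e) _ _ (fun x hx => hall x (by simp [hx]))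
        (pvInv_step d p e h c hc hinv)

-- all-counts-absent case: both sides just keep the last entry
theorem pvFold_none_B :
    ∀ (es : List (List (String × Int))) (p : List (String × Int)),
      (∀ e ∈ es, pvCnt e = none) →
      es.foldl pvStepB (p, none) = (es.getLastD p, none) := by
  intro es
  induction es with
  | nil => intro p _; simp
  | cons e es ih =>
      intro p hall
      have hc : pvCnt e = none := hall e (by simp)
      simp only [List.foldl_cons]
      have hstep : pvStepB (p, none) e = (e, none) := by
        simp only [pvStepB, pvCnt] at hc ⊢; rw [hc]
      rw [hstep, ih e (fun x hx => hall x (by simp [hx]))]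
      cases es with
      | nil => simp
      | cons a as =>
          cases hgl : (a :: as).getLast? with
          | none => simp at hgl
          | some x => simp [hgl]

theorem pvFold_none_A :
    ∀ (es : List (List (String × Int))) (d : PySem.Dict (Option Int) (List (String × Int)))
      (p : List (String × Int)),
      (∀ e ∈ es, pvCnt e = none) →
      es.foldl pvStepA (d.insert none p) = d.insert none (es.getLastD p) := by
  intro es
  induction es with
  | nil => intro d p _; simp
  | cons e es ih =>
      intro d p hall
      have hc : pvCnt e = none := hall e (by simp)
      simp only [List.foldl_cons]
      have hstep : pvStepA (d.insert none p) e = d.insert none e := by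
        simp [pvStepA, pvCnt] at hc ⊢; rw [hc, PySem.Dict.insert_insert_self]
      rw [hstep, ih d e (fun x hx => hall x (by simp [hx]))]
      cases es with
      | nil => simp
      | cons a as =>
          cases hgl : (a :: as).getLast? with
          | none => simp at hgl
          | some x => simp [hgl]

theorem pvMax_of_inv (d : PySem.Dict (Option Int) (List (String × Int)))
    (p : List (String × Int)) (h : Int) (hinv : pvInv d p h) :
    pyMaxKeys d.keys = some (some h) := by
  obtain ⟨hbd, hmem, _⟩ := hinv
  cases hk : d.keys with
  | nil => rw [hk] at hmem; simp at hmem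
  | cons k rest =>
      rw [hk] at hbd hmem
      simp only [pyMaxKeys]
      congr 1
      exact pvFoldMax h rest k (hbd k (by simp))
        (fun x hx => hbd x (by simp [hx]))
        (by rcases List.mem_cons.mp hmem with hm | hm
            · left; exact hm
            · right; exact hm)

-- final assembly
theorem pvMain (summary : List (String × List (List (String × Int))))
    (hpre : Pre_get_primary_language summary) :
    get_primary_language summary = get_primary_language_alt summary := by
  unfold Pre_get_primary_language at hpre
  obtain ⟨hsome, hdisj⟩ := hpre
  cases ho : PySem.Dict.get? (PySem.Dict.mk summary) "programming_language" with
  | none => rw [ho] at hsome; simp at hsome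
  | some es =>
      rw [ho] at hdisj
      unfold get_primary_language get_primary_language_alt
      rw [ho]
      simp only [Option.getD_some]
      cases es with
      | nil => simp [pyMaxKeys]
      | cons e rest =>
          rcases hdisj with hall | hnone
          · -- all entries carry a count
            simp only [Option.getD_some, List.all_cons, Bool.and_eq_true, List.all_eq_true] at hall
            obtain ⟨he, hrest⟩ := hall
            obtain ⟨c, hc⟩ := Option.isSome_iff_exists.mp he
            have hrest' : ∀ x ∈ rest, ∃ cv : Int, pvCnt x = some cv := by
              intro x hx
              exact Option.isSome_iff_exists.mp (hrest x hx)
            -- first step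
            have hstepB : pvStepB ([], none) e = (e, some c) := by
              simp only [pvStepB] at hc ⊢; rw [hc]
            have hstepA : pvStepA PySem.Dict.empty e = PySem.Dict.empty.insert (some c) e := by
              simp only [pvStepA] at hc ⊢; rw [hc]
            have hinv0 : pvInv (PySem.Dict.empty.insert (some c) e) e c := by
              refine ⟨?_, ?_, ?_⟩
              · intro k hk
                rcases (PySem.Dict.mem_keys_insert _ _ _ _).mp hk with rfl | hk
                · exact ⟨c, rfl, le_refl c⟩
                · simp [PySem.Dict.keys_empty] at hk
              · exact (PySem.Dict.mem_keys_insert _ _ _ _).mpr (Or.inl rfl)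
              · exact PySem.Dict.get?_insert_self _ _ _
            obtain ⟨p', h', hB, hinv⟩ :=
              pvFold_some rest (PySem.Dict.empty.insert (some c) e) e c hrest' hinv0
            have hfoldA : (e :: rest).foldl pvStepA PySem.Dict.empty
                = rest.foldl pvStepA (PySem.Dict.empty.insert (some c) e) := by
              simp only [List.foldl_cons, hstepA]
            have hfoldB : (e :: rest).foldl pvStepB ([], none) = (p', some h') := by
              simp only [List.foldl_cons, hstepB, hB]
            have hfoldA2 : (e :: rest).foldl
                (fun d entry => PySem.Dict.insert d (PySem.Dict.get? (PySem.Dict.mk entry) "count") entry)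
                PySem.Dict.empty = rest.foldl pvStepA (PySem.Dict.empty.insert (some c) e) := hfoldA
            rw [hfoldA2, hfoldB]
            obtain ⟨hbd, hmem, hget⟩ := hinv
            have hmax := pvMax_of_inv _ p' h' ⟨hbd, hmem, hget⟩
            have hitems : (rest.foldl pvStepA (PySem.Dict.empty.insert (some c) e)).items ≠ [] := by
              intro hnil
              have : (rest.foldl pvStepA (PySem.Dict.empty.insert (some c) e)).keys = [] := by
                simp [PySem.Dict.keys, hnil]
              rw [this] at hmem; simp at hmem
            rw [if_pos hitems, hmax]
            simp [hget]
          · -- no entry carries a count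
            simp only [Option.getD_some, List.all_cons, Bool.and_eq_true, List.all_eq_true] at hnone
            obtain ⟨he, hrest⟩ := hnone
            have hc : pvCnt e = none := Option.isNone_iff_eq_none.mp he
            have hrest' : ∀ x ∈ rest, pvCnt x = none := by
              intro x hx; exact Option.isNone_iff_eq_none.mp (hrest x hx)
            have hstepB : pvStepB ([], none) e = (e, none) := by
              simp only [pvStepB, pvCnt] at hc ⊢; rw [hc]
            have hstepA : pvStepA PySem.Dict.empty e = PySem.Dict.empty.insert none e := by
              simp only [pvStepA, pvCnt] at hc ⊢; rw [hc]
            have hfoldA : (e :: rest).foldl pvStepA PySem.Dict.empty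
                = PySem.Dict.empty.insert none (rest.getLastD e) := by
              simp only [List.foldl_cons, hstepA]
              exact pvFold_none_A rest PySem.Dict.empty e hrest'
            have hfoldB : (e :: rest).foldl pvStepB ([], none) = (rest.getLastD e, none) := by
              simp only [List.foldl_cons, hstepB]
              exact pvFold_none_B rest e hrest'
            have hfoldA2 : (e :: rest).foldl
                (fun d entry => PySem.Dict.insert d (PySem.Dict.get? (PySem.Dict.mk entry) "count") entry)
                PySem.Dict.empty = PySem.Dict.empty.insert none (rest.getLastD e) := hfoldA
            rw [hfoldA2, hfoldB]
            rfl

-- ===== VERDICT (by name: the statement is the Claim_ definition above) =====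
theorem get_primary_language_spec : Claim_equal_get_primary_language := by
  intro summary _ hpre
  unfold Spec_get_primary_language
  exact pvMain summary hpre
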